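-- pv_equiv track=rewrite | github.com/ZigaOpara/Advent-of-code | 2015/day_15.py | brute_force_recipe
-- ===== SOURCE A (Python) =====
-- def brute_force_recipe(properties, check_calories):
--     best_score = 0
--     for i in range(100):
--         for j in range(100 - i):
--             for k in range(100 - i - j):
--                 l = 100 - i - j - k
--                 c = i * properties[0][0] + j * properties[1][0] + k * properties[2][0] + l * properties[3][0]
--                 d = i * properties[0][1] + j * properties[1][1] + k * properties[2][1] + l * properties[3][1]
--                 f = i * properties[0][2] + j * properties[1][2] + k * properties[2][2] + l * properties[3][2]
--                 t = i * properties[0][3] + j * properties[1][3] + k * properties[2][3] + l * properties[3][3]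
--                 calories = i * properties[0][4] + j * properties[1][4] + k * properties[2][4] + l * \
--                            properties[3][4]
--                 if any(x <= 0 for x in [c, d, f, t]):
--                     continue
--                 if check_calories and calories != 500:
--                     continue
--                 best_score = max(c * d * f * t, best_score)
--     return best_score
-- ===== SOURCE B (Python) =====
-- def brute_force_recipe(properties, check_calories):
--     # Recursive decomposition: walk the ingredient list carrying running
--     # property sums; the first three ingredients take 0..remaining-1 units,
--     # the last takes everything left (so it always gets >= 1, as in A).
--     def go(rows, remaining, sums):
--         if not rows:
--             return 0  # unreachable for a well-formed 4-ingredient input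
--         head = rows[0]
--         if len(rows) == 1:
--             c = sums[0] + remaining * head[0]
--             d = sums[1] + remaining * head[1]
--             f = sums[2] + remaining * head[2]
--             t = sums[3] + remaining * head[3]
--             cal = sums[4] + remaining * head[4]
--             if c <= 0 or d <= 0 or f <= 0 or t <= 0:
--                 return 0
--             if check_calories and cal != 500:
--                 return 0
--             return c * d * f * t
--         best = 0
--         for amt in range(remaining):
--             nxt = (sums[0] + amt * head[0], sums[1] + amt * head[1],
--                    sums[2] + amt * head[2], sums[3] + amt * head[3],
--                    sums[4] + amt * head[4])
--             best = max(best, go(rows[1:], remaining - amt, nxt))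
--         return best
--     return go(properties[:4], 100, (0, 0, 0, 0, 0))
-- ===== Notes on version B (the rewrite author's own statement) =====
-- stated objective: alternative
-- what changed: Replaces the hard-coded triple nested loop recomputing all five dot products at every leaf with a recursion over the ingredient list that carries running property sums, adding one ingredient's contribution per level.
import Mathlib
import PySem

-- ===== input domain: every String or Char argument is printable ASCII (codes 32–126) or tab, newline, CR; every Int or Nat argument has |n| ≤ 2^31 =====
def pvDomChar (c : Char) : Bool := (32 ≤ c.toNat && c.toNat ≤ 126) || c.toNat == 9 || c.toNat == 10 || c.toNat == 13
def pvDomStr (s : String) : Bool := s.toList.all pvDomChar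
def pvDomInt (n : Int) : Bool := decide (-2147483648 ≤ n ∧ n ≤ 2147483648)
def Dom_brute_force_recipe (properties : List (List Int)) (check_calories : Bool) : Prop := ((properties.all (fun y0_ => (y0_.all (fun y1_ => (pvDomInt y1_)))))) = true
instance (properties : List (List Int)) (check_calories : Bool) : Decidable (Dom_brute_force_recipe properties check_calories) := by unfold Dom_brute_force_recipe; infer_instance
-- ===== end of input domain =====

-- B replaces A's hard-coded triple loop by a recursion over the ingredient list
-- carrying running property sums (objective: alternative decomposition).

-- ===== PORT A =====
-- properties[r][c]: exact for in-range indices; Pre_ excludes the IndexError cases.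
def brute_force_recipe (properties : List (List Int)) (check_calories : Bool) : Int :=
  let g : Nat → Nat → Int := fun r c => (properties.getD r []).getD c 0
  (PySem.List.pyRange 0 100 1).foldl (fun best i =>
    (PySem.List.pyRange 0 (100 - i) 1).foldl (fun best j =>
      (PySem.List.pyRange 0 (100 - i - j) 1).foldl (fun best k =>
        let l := 100 - i - j - k
        let c := i * g 0 0 + j * g 1 0 + k * g 2 0 + l * g 3 0
        let d := i * g 0 1 + j * g 1 1 + k * g 2 1 + l * g 3 1
        let f := i * g 0 2 + j * g 1 2 + k * g 2 2 + l * g 3 2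
        let t := i * g 0 3 + j * g 1 3 + k * g 2 3 + l * g 3 3
        let calories := i * g 0 4 + j * g 1 4 + k * g 2 4 + l * g 3 4
        if [c, d, f, t].any (fun x => decide (x ≤ 0)) then best
        else if check_calories && decide (calories ≠ 500) then best
        else max (c * d * f * t) best) best) best) 0

-- ===== PORT B =====
def pvAdd (s : Int × Int × Int × Int × Int) (amt : Int) (row : List Int) :
    Int × Int × Int × Int × Int :=
  (s.1 + amt * row.getD 0 0, s.2.1 + amt * row.getD 1 0, s.2.2.1 + amt * row.getD 2 0,
   s.2.2.2.1 + amt * row.getD 3 0, s.2.2.2.2 + amt * row.getD 4 0)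

-- the len(rows)==1 leaf of Source B's go
def pvLeaf (cc : Bool) (row : List Int) (rem : Int) (s : Int × Int × Int × Int × Int) : Int :=
  let c := s.1 + rem * row.getD 0 0
  let d := s.2.1 + rem * row.getD 1 0
  let f := s.2.2.1 + rem * row.getD 2 0
  let t := s.2.2.2.1 + rem * row.getD 3 0
  let cal := s.2.2.2.2 + rem * row.getD 4 0
  if c ≤ 0 || d ≤ 0 || f ≤ 0 || t ≤ 0 then 0
  else if cc && decide (cal ≠ 500) then 0
  else c * d * f * t

def pvGo (cc : Bool) : List (List Int) → Int → Int × Int × Int × Int × Int → Int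
  | [], _, _ => 0            -- unreachable for a well-formed 4-ingredient input
  | [row], rem, s => pvLeaf cc row rem s
  | r1 :: r2 :: rest, rem, s =>
      (PySem.List.pyRange 0 rem 1).foldl
        (fun best amt => max best (pvGo cc (r2 :: rest) (rem - amt) (pvAdd s amt r1))) 0

-- properties[:4] ported as List.take 4 (exact: both slice bounds nonnegative)
def brute_force_recipe_alt (properties : List (List Int)) (check_calories : Bool) : Int :=
  pvGo check_calories (properties.take 4) 100 (0, 0, 0, 0, 0)

-- ===== PRECONDITION & SPEC =====
-- Exactly the inputs where A returns: four ingredient rows with at least five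
-- properties each (otherwise A raises IndexError).
def Pre_brute_force_recipe (properties : List (List Int)) (check_calories : Bool) : Prop :=
  4 ≤ properties.length ∧ ∀ r ∈ properties.take 4, 5 ≤ r.length
instance (properties : List (List Int)) (check_calories : Bool) : Decidable (Pre_brute_force_recipe properties check_calories) := by unfold Pre_brute_force_recipe; infer_instance

def pvWitness_brute_force_recipe : List (List Int) × Bool :=
  ([[1, 1, 1, 1, 1], [1, 1, 1, 1, 1], [1, 1, 1, 1, 1], [1, 1, 1, 1, 1]], false)

def Spec_brute_force_recipe (properties : List (List Int)) (check_calories : Bool) (out : Int) : Prop := out = brute_force_recipe_alt properties check_calories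
instance (properties : List (List Int)) (check_calories : Bool) (out : Int) : Decidable (Spec_brute_force_recipe properties check_calories out) := by unfold Spec_brute_force_recipe; infer_instance

-- ===== CLAIM (what is proved, stated in full; the proofs are below) =====
def Claim_equal_brute_force_recipe : Prop := ∀ (properties : List (List Int)) (check_calories : Bool), Dom_brute_force_recipe properties check_calories → Pre_brute_force_recipe properties check_calories → Spec_brute_force_recipe properties check_calories (brute_force_recipe properties check_calories)

-- ===== LEMMAS AND PROOFS =====

-- folding max with start b ≥ 0 keeps the accumulator ≥ 0
lemma pv_foldl_max_nonneg (f : Int → Int) :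
    ∀ (L : List Int) (b : Int), 0 ≤ b → 0 ≤ L.foldl (fun x k => max x (f k)) b := by
  intro L
  induction L with
  | nil => intro b hb; simpa using hb
  | cons k L ih =>
    intro b hb
    simpa [List.foldl] using ih (max b (f k)) (le_trans hb (le_max_left _ _))

lemma pv_leaf_nonneg (cc : Bool) (row : List Int) (rem : Int) (s : Int × Int × Int × Int × Int) :
    0 ≤ pvLeaf cc row rem s := by
  unfold pvLeaf
  dsimp only
  split_ifs with h1 h2
  · exact le_refl 0
  · exact le_refl 0
  · simp only [Bool.or_eq_true, decide_eq_true_eq, not_or] at h1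
    obtain ⟨⟨⟨hc, hd⟩, hf⟩, ht⟩ := h1
    exact le_of_lt (mul_pos (mul_pos (mul_pos (lt_of_not_ge hc) (lt_of_not_ge hd))
      (lt_of_not_ge hf)) (lt_of_not_ge ht))

lemma pv_go_nonneg (cc : Bool) :
    ∀ (rows : List (List Int)) (rem : Int) (s : Int × Int × Int × Int × Int),
      0 ≤ pvGo cc rows rem s := by
  intro rows rem s
  match rows with
  | [] => simp [pvGo]
  | [row] => simpa [pvGo] using pv_leaf_nonneg cc row rem s
  | r1 :: r2 :: rest =>
    simpa [pvGo] using pv_foldl_max_nonneg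
      (fun amt => pvGo cc (r2 :: rest) (rem - amt) (pvAdd s amt r1))
      (PySem.List.pyRange 0 rem 1) 0 le_rfl

-- max-fold with an arbitrary nonneg start shifts out of the fold
lemma pv_foldl_max_shift (f : Int → Int) (hf : ∀ k, 0 ≤ f k) :
    ∀ (L : List Int) (b : Int), 0 ≤ b →
      L.foldl (fun x k => max x (f k)) b = max b (L.foldl (fun x k => max x (f k)) 0) := by
  intro L
  induction L with
  | nil => intro b hb; simp [max_eq_left hb]
  | cons k L ih =>
    intro b hb
    have h1 : 0 ≤ max b (f k) := le_trans hb (le_max_left _ _)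
    have h2 : (0 : Int) ≤ f k := hf k
    simp only [List.foldl]
    rw [ih (max b (f k)) h1, ih (max 0 (f k)) (le_trans h2 (le_max_right _ _)),
      max_eq_right h2, max_assoc]

-- a fold whose step behaves like "max with f" on nonneg accumulators IS the max-fold
lemma pv_foldl_step_max (f : Int → Int) (step : Int → Int → Int)
    (hf : ∀ k, 0 ≤ f k) (hstep : ∀ b k, 0 ≤ b → step b k = max b (f k)) :
    ∀ (L : List Int) (b : Int), 0 ≤ b →
      L.foldl step b = max b (L.foldl (fun x k => max x (f k)) 0) := by
  intro L
  induction L with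
  | nil => intro b hb; simp [max_eq_left hb]
  | cons k L ih =>
    intro b hb
    have h2 : (0 : Int) ≤ f k := hf k
    have h1 : 0 ≤ max b (f k) := le_trans hb (le_max_left _ _)
    simp only [List.foldl]
    rw [hstep b k hb, ih (max b (f k)) h1,
      pv_foldl_max_shift f hf L (max 0 (f k)) (le_trans h2 (le_max_right _ _)),
      max_eq_right h2, max_assoc]

-- A's leaf step equals "max with B's leaf value"
lemma pv_leaf_step (cc : Bool) (b c d f t cal : Int) (hb : 0 ≤ b) :
    (if [c, d, f, t].any (fun x => decide (x ≤ 0)) then b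
     else if cc && decide (cal ≠ 500) then b else max (c * d * f * t) b)
    = max b (if c ≤ 0 || d ≤ 0 || f ≤ 0 || t ≤ 0 then 0
             else if cc && decide (cal ≠ 500) then 0 else c * d * f * t) := by
  have hany : ([c, d, f, t].any (fun x => decide (x ≤ 0)))
      = (c ≤ 0 || d ≤ 0 || f ≤ 0 || t ≤ 0) := by
    simp [List.any, Bool.or_assoc]
  rw [hany]
  split_ifs with h1 h2
  · exact (max_eq_left hb).symm
  · exact (max_eq_left hb).symm
  · exact max_comm _ _

set_option maxHeartbeats 1000000 in
theorem pv_main (props : List (List Int)) (cc : Bool) :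
    brute_force_recipe props cc
      = pvGo cc [props.getD 0 [], props.getD 1 [], props.getD 2 [], props.getD 3 []]
          100 (0, 0, 0, 0, 0) := by
  have step3 : ∀ (s : Int × Int × Int × Int × Int) (rem b : Int), 0 ≤ b →
      (PySem.List.pyRange 0 rem 1).foldl (fun best k =>
        let l := rem - k
        let c := s.1 + k * (props.getD 2 []).getD 0 0 + l * (props.getD 3 []).getD 0 0
        let d := s.2.1 + k * (props.getD 2 []).getD 1 0 + l * (props.getD 3 []).getD 1 0
        let f := s.2.2.1 + k * (props.getD 2 []).getD 2 0 + l * (props.getD 3 []).getD 2 0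
        let t := s.2.2.2.1 + k * (props.getD 2 []).getD 3 0 + l * (props.getD 3 []).getD 3 0
        let cal := s.2.2.2.2 + k * (props.getD 2 []).getD 4 0 + l * (props.getD 3 []).getD 4 0
        if [c, d, f, t].any (fun x => decide (x ≤ 0)) then best
        else if cc && decide (cal ≠ 500) then best
        else max (c * d * f * t) best) b
      = max b (pvGo cc [props.getD 2 [], props.getD 3 []] rem s) := by
    intro s rem b hb
    rw [pvGo]
    simp only [pvGo]
    refine pv_foldl_step_max _ _
      (fun k => pv_leaf_nonneg cc (props.getD 3 []) (rem - k) (pvAdd s k (props.getD 2 [])))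
      ?_ (PySem.List.pyRange 0 rem 1) b hb
    intro b' k hb'
    simp only [pvLeaf, pvAdd]
    exact pv_leaf_step cc b' _ _ _ _ _ hb'
  have step2 : ∀ (s : Int × Int × Int × Int × Int) (rem b : Int), 0 ≤ b →
      (PySem.List.pyRange 0 rem 1).foldl (fun best j =>
        (PySem.List.pyRange 0 (rem - j) 1).foldl (fun best k =>
          let l := rem - j - k
          let c := s.1 + j * (props.getD 1 []).getD 0 0 + k * (props.getD 2 []).getD 0 0
                    + l * (props.getD 3 []).getD 0 0
          let d := s.2.1 + j * (props.getD 1 []).getD 1 0 + k * (props.getD 2 []).getD 1 0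
                    + l * (props.getD 3 []).getD 1 0
          let f := s.2.2.1 + j * (props.getD 1 []).getD 2 0 + k * (props.getD 2 []).getD 2 0
                    + l * (props.getD 3 []).getD 2 0
          let t := s.2.2.2.1 + j * (props.getD 1 []).getD 3 0 + k * (props.getD 2 []).getD 3 0
                    + l * (props.getD 3 []).getD 3 0
          let cal := s.2.2.2.2 + j * (props.getD 1 []).getD 4 0 + k * (props.getD 2 []).getD 4 0
                    + l * (props.getD 3 []).getD 4 0
          if [c, d, f, t].any (fun x => decide (x ≤ 0)) then best
          else if cc && decide (cal ≠ 500) then best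
          else max (c * d * f * t) best) best) b
      = max b (pvGo cc [props.getD 1 [], props.getD 2 [], props.getD 3 []] rem s) := by
    intro s rem b hb
    rw [pvGo]
    refine pv_foldl_step_max _ _
      (fun j => pv_go_nonneg cc [props.getD 2 [], props.getD 3 []] (rem - j)
        (pvAdd s j (props.getD 1 [])))
      ?_ (PySem.List.pyRange 0 rem 1) b hb
    intro b' j hb'
    exact step3 (pvAdd s j (props.getD 1 [])) (rem - j) b' hb'
  have hstep1 : ∀ (b i : Int), 0 ≤ b →
      (PySem.List.pyRange 0 (100 - i) 1).foldl (fun best j =>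
        (PySem.List.pyRange 0 (100 - i - j) 1).foldl (fun best k =>
          let l := 100 - i - j - k
          let c := i * (props.getD 0 []).getD 0 0 + j * (props.getD 1 []).getD 0 0
                    + k * (props.getD 2 []).getD 0 0 + l * (props.getD 3 []).getD 0 0
          let d := i * (props.getD 0 []).getD 1 0 + j * (props.getD 1 []).getD 1 0
                    + k * (props.getD 2 []).getD 1 0 + l * (props.getD 3 []).getD 1 0
          let f := i * (props.getD 0 []).getD 2 0 + j * (props.getD 1 []).getD 2 0
                    + k * (props.getD 2 []).getD 2 0 + l * (props.getD 3 []).getD 2 0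
          let t := i * (props.getD 0 []).getD 3 0 + j * (props.getD 1 []).getD 3 0
                    + k * (props.getD 2 []).getD 3 0 + l * (props.getD 3 []).getD 3 0
          let cal := i * (props.getD 0 []).getD 4 0 + j * (props.getD 1 []).getD 4 0
                    + k * (props.getD 2 []).getD 4 0 + l * (props.getD 3 []).getD 4 0
          if [c, d, f, t].any (fun x => decide (x ≤ 0)) then best
          else if cc && decide (cal ≠ 500) then best
          else max (c * d * f * t) best) best) b
      = max b (pvGo cc [props.getD 1 [], props.getD 2 [], props.getD 3 []] (100 - i)
          (pvAdd (0, 0, 0, 0, 0) i (props.getD 0 []))) := by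
    intro b i hb
    have he : pvAdd ((0 : Int), (0 : Int), (0 : Int), (0 : Int), (0 : Int)) i (props.getD 0 [])
        = (i * (props.getD 0 []).getD 0 0, i * (props.getD 0 []).getD 1 0,
           i * (props.getD 0 []).getD 2 0, i * (props.getD 0 []).getD 3 0,
           i * (props.getD 0 []).getD 4 0) := by
      simp [pvAdd]
    rw [he]
    exact step2 (i * (props.getD 0 []).getD 0 0, i * (props.getD 0 []).getD 1 0,
      i * (props.getD 0 []).getD 2 0, i * (props.getD 0 []).getD 3 0,
      i * (props.getD 0 []).getD 4 0) (100 - i) b hb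
  unfold brute_force_recipe
  dsimp only
  rw [pvGo]
  exact (pv_foldl_step_max
      (fun i => pvGo cc [props.getD 1 [], props.getD 2 [], props.getD 3 []] (100 - i)
        (pvAdd (0, 0, 0, 0, 0) i (props.getD 0 [])))
      _
      (fun i => pv_go_nonneg cc [props.getD 1 [], props.getD 2 [], props.getD 3 []] (100 - i)
        (pvAdd (0, 0, 0, 0, 0) i (props.getD 0 [])))
      hstep1 (PySem.List.pyRange 0 100 1) 0 le_rfl).trans
    (max_eq_right (pv_foldl_max_nonneg _ _ 0 le_rfl))

lemma pv_take4 (props : List (List Int)) (h : 4 ≤ props.length) :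
    props.take 4 = [props.getD 0 [], props.getD 1 [], props.getD 2 [], props.getD 3 []] := by
  match props, h with
  | a :: b :: c :: d :: rest, _ => rfl

-- ===== VERDICT (by name: the statement is the Claim_ definition above) =====
theorem brute_force_recipe_spec : Claim_equal_brute_force_recipe := by
  intro props cc _hdom hpre
  obtain ⟨hlen, -⟩ := hpre
  show brute_force_recipe props cc = brute_force_recipe_alt props cc
  unfold brute_force_recipe_alt
  rw [pv_take4 props hlen]
  exact pv_main props cc
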